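-- pv_equiv track=rewrite | github.com/tensorflow/tensorflow | tensorflow/python/ops/numpy_ops/tests/np_indexing_test.py | _broadcastable_shapes
-- ===== SOURCE A (Python) =====
-- def _broadcastable_shapes(shape):
--   """Returns all shapes that broadcast to `shape`."""
--   def f(rshape):
--     yield []
--     if rshape:
--       for s in f(rshape[1:]):
--         yield rshape[0:1] + s
--       if rshape[0] != 1:
--         for s in f(rshape[1:]):
--           yield [1] + s
--   for x in f(list(reversed(shape))):
--     yield list(reversed(x))
-- ===== SOURCE B (Python) =====
-- def _broadcastable_shapes(shape):
--   """Returns all shapes that broadcast to `shape` (iterative DFS with an explicit stack)."""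
--   shape = list(shape)
--   n = len(shape)
--   stack = [[]]  # reversed partials; top of stack = end of list
--   while stack:
--     p = stack.pop()
--     yield list(reversed(p))
--     l = len(p)
--     if l < n:
--       v = shape[n - 1 - l]
--       if v != 1:
--         stack.append(p + [1])
--       stack.append(p + [v])
-- ===== Notes on version B (the rewrite author's own statement) =====
-- stated objective: alternative
-- what changed: Replaced the nested recursive generator (recursion on the reversed shape with two sub-generator loops per level) by an iterative depth-first traversal with an explicit LIFO stack of reversed partial shapes, pushing the '1' branch below the 'keep' branch to preserve the exact preorder.
import Mathlib
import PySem

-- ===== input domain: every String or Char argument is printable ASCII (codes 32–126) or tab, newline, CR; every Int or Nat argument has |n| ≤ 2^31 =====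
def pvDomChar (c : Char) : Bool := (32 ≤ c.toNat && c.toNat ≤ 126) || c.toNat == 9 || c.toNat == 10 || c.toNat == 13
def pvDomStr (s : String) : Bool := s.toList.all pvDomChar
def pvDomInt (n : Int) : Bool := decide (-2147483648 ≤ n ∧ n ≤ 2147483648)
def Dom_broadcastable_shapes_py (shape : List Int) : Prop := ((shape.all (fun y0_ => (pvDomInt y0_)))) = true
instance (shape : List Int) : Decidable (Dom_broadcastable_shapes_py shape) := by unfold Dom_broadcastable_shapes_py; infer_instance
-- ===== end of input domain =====

-- B replaces A's nested recursive generator by an explicit-stack iterative DFS producing the same preorder (objective: alternative).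


-- ===== PORT A =====
-- A's inner recursive generator f(rshape), literally: yield [], then rshape[0:1]+s for
-- s in f(rshape[1:]), then (if rshape[0] != 1) [1]+s for s in f(rshape[1:]).
def pvAf : List Int → List (List Int)
  | [] => [[]]
  | h :: t =>
      [] :: ((pvAf t).map (fun s => [h] ++ s) ++
             (if h ≠ 1 then (pvAf t).map (fun s => [1] ++ s) else []))

def broadcastable_shapes_py (shape : List Int) : List (List Int) :=
  (pvAf shape.reverse).map List.reverse

-- ===== PORT B =====
-- Source B: explicit LIFO stack of reversed partials; head of the Lean list = top of the
-- Python stack, so Python's 'append p+[1]; append p+[v]' becomes '(p++[v]) :: opt-(p++[1]) :: rest'.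
def pvBrun (shape : List Int) : List (List Int) → List (List Int)
  | [] => []
  | p :: rest =>
      p.reverse ::
        (if _h : p.length < shape.length then
          -- v = shape[n - 1 - l], inlined (always in range here, so getD's default is inert)
          pvBrun shape ((p ++ [shape.getD (shape.length - 1 - p.length) 0]) ::
            ((if shape.getD (shape.length - 1 - p.length) 0 ≠ 1 then [p ++ [1]] else []) ++ rest))
        else
          pvBrun shape rest)
  termination_by stack => (stack.map (fun p => 3 ^ (shape.length - p.length))).sum
  decreasing_by
  · simp only [List.map_cons, List.sum_cons, List.length_append, List.length_cons,
      List.length_nil]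
    have h3 : 3 ^ (shape.length - p.length) = 3 * 3 ^ (shape.length - (p.length + 1)) := by
      rw [← pow_succ']; congr 1; omega
    have h0 : 0 < 3 ^ (shape.length - (p.length + 1)) := Nat.pow_pos (by norm_num)
    split <;>
      simp only [List.map_cons, List.map_append, List.map_nil, List.sum_cons,
        List.sum_append, List.sum_nil, List.length_append, List.length_cons,
        List.length_nil, Nat.zero_add] <;> omega
  · simp only [List.map_cons, List.sum_cons]
    have : 0 < 3 ^ (shape.length - p.length) := Nat.pow_pos (by norm_num)
    omega

def broadcastable_shapes_py_alt (shape : List Int) : List (List Int) :=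
  pvBrun shape [[]]

-- ===== PRECONDITION & SPEC =====
def Spec_broadcastable_shapes_py (shape : List Int) (out : List (List Int)) : Prop := out = broadcastable_shapes_py_alt shape
instance (shape : List Int) (out : List (List Int)) : Decidable (Spec_broadcastable_shapes_py shape out) := by unfold Spec_broadcastable_shapes_py; infer_instance

-- ===== CLAIM (what is proved, stated in full; the proofs are below) =====
def Claim_equal_broadcastable_shapes_py : Prop := ∀ (shape : List Int), Dom_broadcastable_shapes_py shape → Spec_broadcastable_shapes_py shape (broadcastable_shapes_py shape)

-- ===== LEMMAS AND PROOFS =====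

-- The stack run expands each pending reversed-partial p to exactly the block of outputs
-- A's recursive generator produces below it: pvAf on the remaining (reversed) dims,
-- each result appended to p and reversed back.
theorem pvBrun_flatMap (shape : List Int) (stack : List (List Int)) :
    pvBrun shape stack =
      stack.flatMap (fun p =>
        (pvAf (shape.reverse.drop p.length)).map (fun s => (p ++ s).reverse)) := by
  induction stack using pvBrun.induct shape with
  | case1 => simp [pvBrun]
  | case2 p rest ih1 ih2 =>
      by_cases h : p.length < shape.length
      · have hidx : shape.length - 1 - p.length < shape.length := by omega
        have hv : shape.getD (shape.length - 1 - p.length) 0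
            = shape.reverse[p.length]'(by simpa using h) := by
          rw [List.getD_eq_getElem shape 0 hidx, List.getElem_reverse]
        have hdrop : shape.reverse.drop p.length
            = shape.reverse[p.length]'(by simpa using h) :: shape.reverse.drop (p.length + 1) :=
          List.drop_eq_getElem_cons (by simpa using h)
        simp only [dite_eq_ite] at ih1
        rw [pvBrun, dif_pos h, ih1 h]
        simp only [List.flatMap_cons, List.flatMap_append, hdrop, ← hv, pvAf,
          List.length_append, List.length_cons, List.length_nil, Nat.zero_add,
          List.map_cons, List.map_append, List.map_map]
        split
        · simp [List.flatMap_cons, List.map_map, Function.comp_def, List.append_assoc]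
        · simp [Function.comp_def, List.append_assoc]
      · have hlen : shape.reverse.length ≤ p.length := by simpa using Nat.le_of_not_lt h
        rw [pvBrun, dif_neg h, ih2]
        simp [List.drop_of_length_le hlen, pvAf]

-- ===== VERDICT (by name: the statement is the Claim_ definition above) =====
theorem broadcastable_shapes_py_spec : Claim_equal_broadcastable_shapes_py := by
  intro shape _
  unfold Spec_broadcastable_shapes_py broadcastable_shapes_py broadcastable_shapes_py_alt
  rw [pvBrun_flatMap]
  simp
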